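-- pv_equiv track=rewrite | github.com/AntonioRoldan/Algorithmic-problems-in-python | load_composition/src/load_composition.py | compute_load_composition
-- ===== SOURCE A (Python) =====
-- def compute_load_composition(amount, materials):
--     threshold = amount
--     load_composition = 0
--     output = ""
--     for material in (sorted(zip(materials.keys(), materials.values()), key=lambda x : x[1][1], reverse=True)): #We have a list of tuples, each tuple contains a string and another tuple defining weight and price
--         kg = 0
--         amount_left = material[1][0]
--         while(amount_left and threshold): #Loop continues for as long as we have a certain component and the amount has not been reached
--             load_composition += material[1][1]
--             kg += 1
--             amount_left -= 1
--             threshold -= 1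
--             if(threshold == 1):
--                 output += "and "
--         if(kg):
--             output += str(kg) + "kg of " + material[0] + " "
--     return "Load composition: " + str(load_composition) + "\n" + output
-- ===== SOURCE B (Python) =====
-- def compute_load_composition(amount, materials):
--     remaining = amount
--     total = 0
--     output = ""
--     for name, (weight, price) in sorted(materials.items(), key=lambda kv: kv[1][1], reverse=True):
--         kg = min(weight, remaining)
--         if kg > 0:
--             total += kg * price
--             if remaining > 1 and remaining - kg <= 1:
--                 output += "and "
--             remaining -= kg
--             output += str(kg) + "kg of " + name + " "
--     return "Load composition: " + str(total) + "\n" + output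
-- ===== Notes on version B (the rewrite author's own statement) =====
-- stated objective: faster
-- what changed: Replaces the per-kilogram while loop (one iteration per unit of load) with a single arithmetic step per material (kg = min(weight, remaining), the threshold crossing to 1 detected by an inequality for the 'and ' insertion); Pre_ restricts to the natural domain of nonnegative amounts, where for amount < 0 A's truthiness-driven threshold runs past zero (A diverges on a negative-weight material and otherwise ships the whole inventory regardless of the amount).
-- intended difference: On a positive amount with a material of negative weight, A's truthiness loop ships the whole remaining load from that nonsensical empty stock when it reaches it (e.g. 'and 3kg of a ' from stock -1), while B skips it and ships nothing from it, the intended greedy behaviour. — e.g. on compute_load_composition(3, [("a", -1, 5)]): A returns "Load composition: 15\nand 3kg of a ", B returns "Load composition: 0\n"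
-- outside the precondition, e.g. on compute_load_composition(-1, {'': (1, 1)}): A returns 'Load composition: 1\n1kg of  ', B returns 'Load composition: 0\n'
import Mathlib
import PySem

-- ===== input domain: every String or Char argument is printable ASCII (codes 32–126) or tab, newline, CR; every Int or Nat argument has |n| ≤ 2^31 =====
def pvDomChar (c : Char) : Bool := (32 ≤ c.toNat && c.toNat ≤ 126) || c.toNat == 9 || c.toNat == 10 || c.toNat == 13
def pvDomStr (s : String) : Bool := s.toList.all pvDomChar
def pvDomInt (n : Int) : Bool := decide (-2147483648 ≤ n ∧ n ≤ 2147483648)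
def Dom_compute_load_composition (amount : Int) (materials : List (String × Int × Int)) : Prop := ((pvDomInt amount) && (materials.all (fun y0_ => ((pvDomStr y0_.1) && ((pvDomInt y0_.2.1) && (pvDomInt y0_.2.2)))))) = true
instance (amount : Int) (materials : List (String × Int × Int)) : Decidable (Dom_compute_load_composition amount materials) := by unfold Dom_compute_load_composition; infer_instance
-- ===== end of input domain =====

-- B replaces A's per-kilogram while loop by one arithmetic step per material (same sort, same return value on nonnegative amounts and stocks).

-- ===== PORT A =====
-- A's inner 'while (amount_left and threshold)' loop; state (w = amount_left, t = threshold, load, kg, out),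
-- returns (t, load, kg, out).  fuel = threshold.toNat is exact whenever threshold ≥ 0: the loop decrements
-- threshold each iteration and its condition fails at 0 (negative thresholds, where the loop either runs
-- forever or runs w steps past the threshold, are excluded by Pre_).
def pvWhileA (price : Int) : Nat → Int → Int → Int → Int → String → Int × Int × Int × String
  | 0, _, t, load, kg, out => (t, load, kg, out)
  | fuel + 1, w, t, load, kg, out =>
    if w ≠ 0 ∧ t ≠ 0 then
      let load' := load + price
      let kg' := kg + 1
      let w' := w - 1
      let t' := t - 1
      let out' := if t' = 1 then out ++ "and " else out
      pvWhileA price fuel w' t' load' kg' out'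
    else (t, load, kg, out)

-- one iteration of A's for loop; st = (load_composition, threshold, output)
def pvStepA (st : Int × Int × String) (material : String × Int × Int) : Int × Int × String :=
  let r := pvWhileA material.2.2 st.2.1.toNat material.2.1 st.2.1 st.1 0 st.2.2
  let output := if r.2.2.1 ≠ 0 then r.2.2.2 ++ PySem.Int.toStr r.2.2.1 ++ "kg of " ++ material.1 ++ " " else r.2.2.2
  (r.2.1, r.1, output)

def compute_load_composition (amount : Int) (materials : List (String × Int × Int)) : String :=
  let sortedM := PySem.List.sorted materials (fun x => x.2.2) true
  let st := sortedM.foldl pvStepA (0, amount, "")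
  "Load composition: " ++ PySem.Int.toStr st.1 ++ "\n" ++ st.2.2

-- ===== PORT B =====
-- B's for loop; carries (remaining, total, output)
def pvAltGo : Int → Int → String → List (String × Int × Int) → Int × String
  | _, total, out, [] => (total, out)
  | thr, total, out, (name, w, p) :: rest =>
    let kg := min w thr
    if 0 < kg then
      let out' := if 1 < thr ∧ thr - kg ≤ 1 then out ++ "and " else out
      pvAltGo (thr - kg) (total + kg * p) (out' ++ PySem.Int.toStr kg ++ "kg of " ++ name ++ " ") rest
    else pvAltGo thr total out rest

def compute_load_composition_alt (amount : Int) (materials : List (String × Int × Int)) : String :=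
  let r := pvAltGo amount 0 "" (PySem.List.sorted materials (fun x => x.2.2) true)
  "Load composition: " ++ PySem.Int.toStr r.1 ++ "\n" ++ r.2

-- ===== PRECONDITION & SPEC =====
-- Pre_ restricts to the natural domain of nonnegative amounts: for a negative amount the threshold test is
-- pure truthiness, so A loops forever whenever a material with negative weight is reached and otherwise
-- ships the whole inventory regardless of the amount.
def Pre_compute_load_composition (amount : Int) (materials : List (String × Int × Int)) : Prop := 0 ≤ amount
instance (amount : Int) (materials : List (String × Int × Int)) : Decidable (Pre_compute_load_composition amount materials) := by unfold Pre_compute_load_composition; infer_instance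

def pvWitness_compute_load_composition : Int × (List (String × Int × Int)) := (3, [("iron", 2, 5)])

-- On a positive amount with a material of negative weight, A's truthiness loop ships the whole remaining
-- load from that (nonsensical, empty) stock whenever it reaches it; B skips such a material, which is the
-- intended greedy behaviour.
def D_compute_load_composition (amount : Int) (materials : List (String × Int × Int)) : Prop :=
  0 < amount ∧ ∃ m ∈ materials, m.2.1 < 0
instance (amount : Int) (materials : List (String × Int × Int)) : Decidable (D_compute_load_composition amount materials) := by unfold D_compute_load_composition; infer_instance

def Spec_compute_load_composition (amount : Int) (materials : List (String × Int × Int)) (out : String) : Prop := ¬ D_compute_load_composition amount materials → out = compute_load_composition_alt amount materials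
instance (amount : Int) (materials : List (String × Int × Int)) (out : String) : Decidable (Spec_compute_load_composition amount materials out) := by unfold Spec_compute_load_composition; infer_instance

def pvDiffWitness_compute_load_composition : Int × (List (String × Int × Int)) := (3, [("a", -1, 5)])
def pvDiffWitnessOut_compute_load_composition : String × String := ("Load composition: 15\nand 3kg of a ", "Load composition: 0\n")

-- ===== CLAIM (what is proved, stated in full; the proofs are below) =====
def Claim_unchanged_compute_load_composition : Prop := ∀ (amount : Int) (materials : List (String × Int × Int)), Dom_compute_load_composition amount materials → Pre_compute_load_composition amount materials → Spec_compute_load_composition amount materials (compute_load_composition amount materials)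
def Claim_changed_compute_load_composition : Prop := Dom_compute_load_composition (pvDiffWitness_compute_load_composition.1) (pvDiffWitness_compute_load_composition.2) ∧ Pre_compute_load_composition (pvDiffWitness_compute_load_composition.1) (pvDiffWitness_compute_load_composition.2) ∧ D_compute_load_composition (pvDiffWitness_compute_load_composition.1) (pvDiffWitness_compute_load_composition.2) ∧ compute_load_composition (pvDiffWitness_compute_load_composition.1) (pvDiffWitness_compute_load_composition.2) = pvDiffWitnessOut_compute_load_composition.1 ∧ compute_load_composition_alt (pvDiffWitness_compute_load_composition.1) (pvDiffWitness_compute_load_composition.2) = pvDiffWitnessOut_compute_load_composition.2 ∧ pvDiffWitnessOut_compute_load_composition.1 ≠ pvDiffWitnessOut_compute_load_composition.2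

-- ===== LEMMAS AND PROOFS =====

-- how many kilograms A's while loop consumes from a material of weight w at threshold t (w ≥ 0, t ≥ 0)
def pvTake (w t : Int) : Int := min w t

lemma pvTake_nonneg (w t : Int) (_hw : 0 ≤ w) (h : 0 ≤ t) : 0 ≤ pvTake w t := by
  unfold pvTake; omega

lemma pvTake_le (w t : Int) (_hw : 0 ≤ w) (_h : 0 ≤ t) : pvTake w t ≤ t := by
  unfold pvTake; omega

lemma pvTake_succ (w t : Int) (_hw : 0 < w) (_ht : 1 ≤ t) :
    pvTake w t = pvTake (w - 1) (t - 1) + 1 := by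
  unfold pvTake; omega

lemma pvWhileA_char (price : Int) (n : Nat) : ∀ (w t load kg : Int) (out : String),
    t.toNat = n → 0 ≤ t → 0 ≤ w →
    pvWhileA price n w t load kg out =
      (t - pvTake w t, load + pvTake w t * price, kg + pvTake w t,
       if 1 < t ∧ t - pvTake w t ≤ 1 then out ++ "and " else out) := by
  induction n with
  | zero =>
    intro w t load kg out ht h0 hw
    have ht0 : t = 0 := by omega
    subst ht0
    have htake : pvTake w 0 = 0 := by unfold pvTake; omega
    simp [pvWhileA, htake]
  | succ f ih =>
    intro w t load kg out ht h0 hw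
    have ht1 : 1 ≤ t := by omega
    by_cases hwz : w = 0
    · subst hwz
      have htake : pvTake 0 t = 0 := by unfold pvTake; omega
      simp [pvWhileA, htake]
    · have hcond : (w ≠ 0 ∧ t ≠ 0) := ⟨hwz, by omega⟩
      have hf : (t - 1).toNat = f := by omega
      simp only [pvWhileA, if_pos hcond]
      rw [ih (w - 1) (t - 1) (load + price) (kg + 1)
            (if t - 1 = 1 then out ++ "and " else out) hf (by omega) (by omega)]
      rw [pvTake_succ w t (by omega) ht1]
      have hT0 : 0 ≤ pvTake (w - 1) (t - 1) := pvTake_nonneg _ _ (by omega) (by omega)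
      simp only [Prod.mk.injEq]
      refine ⟨by ring, by ring, by ring, ?_⟩
      split_ifs <;> first | rfl | (exfalso; omega)

lemma pvFoldA_eq (l : List (String × Int × Int)) : ∀ (load t : Int) (out : String), 0 ≤ t →
    (∀ m ∈ l, 0 ≤ m.2.1) →
    ((l.foldl pvStepA (load, t, out)).1, (l.foldl pvStepA (load, t, out)).2.2)
      = pvAltGo t load out l := by
  induction l with
  | nil => intro load t out h0 hwl; simp [pvAltGo]
  | cons m rest ih =>
    rcases m with ⟨name, w, p⟩
    intro load t out h0 hwl
    have hw : 0 ≤ w := hwl _ (List.mem_cons_self)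
    have hwr : ∀ m ∈ rest, 0 ≤ m.2.1 := fun m hm => hwl m (List.mem_cons_of_mem _ hm)
    rw [List.foldl_cons]
    have hstep : pvStepA (load, t, out) (name, w, p) =
        (load + pvTake w t * p, t - pvTake w t,
         if pvTake w t ≠ 0 then
           (if 1 < t ∧ t - pvTake w t ≤ 1 then out ++ "and " else out)
             ++ PySem.Int.toStr (pvTake w t) ++ "kg of " ++ name ++ " "
         else (if 1 < t ∧ t - pvTake w t ≤ 1 then out ++ "and " else out)) := by
      unfold pvStepA
      rw [pvWhileA_char p t.toNat w t load 0 out rfl h0 hw]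
      simp
    rw [hstep]
    by_cases hk : 0 < pvTake w t
    · have htne : pvTake w t ≠ 0 := by omega
      rw [if_pos htne]
      have h0' : 0 ≤ t - pvTake w t := by have := pvTake_le w t hw h0; omega
      rw [ih _ _ _ h0' hwr]
      conv_rhs => rw [pvAltGo.eq_def]
      simp only [pvTake] at hk ⊢
      simp only [if_pos hk]
      rfl
    · have htz : pvTake w t = 0 := by
        have := pvTake_nonneg w t hw h0; omega
      simp only [htz, ne_eq, not_true_eq_false, if_false, sub_zero, zero_mul, add_zero]
      have hc2 : ¬ ((1:Int) < t ∧ t ≤ 1) := by omega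
      rw [if_neg hc2]
      rw [ih load t out h0 hwr]
      conv_rhs => rw [pvAltGo.eq_def]
      simp only [pvTake] at hk
      simp only [if_neg hk]

-- state is unchanged when the threshold is already 0
lemma pvFoldA_zero (l : List (String × Int × Int)) : ∀ (load : Int) (out : String),
    l.foldl pvStepA (load, 0, out) = (load, 0, out) := by
  induction l with
  | nil => intro load out; rfl
  | cons m rest ih =>
    rcases m with ⟨name, w, p⟩
    intro load out
    rw [List.foldl_cons]
    have : pvStepA (load, 0, out) (name, w, p) = (load, 0, out) := rfl
    rw [this, ih]

lemma pvAltGo_zero (l : List (String × Int × Int)) : ∀ (total : Int) (out : String),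
    pvAltGo 0 total out l = (total, out) := by
  induction l with
  | nil => intro total out; rfl
  | cons m rest ih =>
    rcases m with ⟨name, w, p⟩
    intro total out
    have hk : ¬ (0 < min w 0) := by omega
    simp only [pvAltGo, if_neg hk]
    exact ih total out

-- ===== VERDICT (by name: the statements are the Claim_ definitions above) =====
theorem compute_load_composition_spec : Claim_unchanged_compute_load_composition := by
  intro amount materials _hdom hpre
  unfold Spec_compute_load_composition
  intro hnD
  unfold compute_load_composition compute_load_composition_alt
  by_cases hpos : 0 < amount
  · have hall : ∀ m ∈ materials, 0 ≤ m.2.1 := by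
      unfold D_compute_load_composition at hnD
      push Not at hnD
      exact fun m hm => hnD hpos m hm
    have hmem : ∀ m ∈ PySem.List.sorted materials (fun x => x.2.2) true, 0 ≤ m.2.1 := by
      intro m hm
      exact hall m ((PySem.List.mem_sorted _ _ _ _).mp hm)
    have h := pvFoldA_eq (PySem.List.sorted materials (fun x => x.2.2) true) 0 amount "" hpre hmem
    rw [← h]
  · have h0 : amount = 0 := by unfold Pre_compute_load_composition at hpre; omega
    subst h0
    simp only [pvFoldA_zero, pvAltGo_zero]

theorem compute_load_composition_changed : Claim_changed_compute_load_composition := by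
  unfold Claim_changed_compute_load_composition; decide
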